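-- pv_equiv track=rewrite | github.com/pranjalsingh7456/Leetcode-Solutions-Python | neon_number.py | neon
-- ===== SOURCE A (Python) =====
-- def neon(n):
--     n1 = n
--     square = n1 * n1
--
--     def sod(square):
--         total = 0
--         while square > 0:
--             digit = square % 10
--             total = total + digit
--             square = square // 10
--         return total
--
--     s = sod(square)
--
--     if s == n1:
--         return True
--     else:
--         return False
-- ===== SOURCE B (Python) =====
-- def neon(n):
--     # Closed form: the digit sum of n*n is at most 9*len(str(n*n)), which grows
--     # logarithmically while n grows linearly, so dsum(n*n) < n for every n > 36
--     # (for a d-digit n, dsum(n*n) <= 18*d < 10**(d-1) <= n once d >= 3, and the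
--     # two-digit range 10..36 is checked exhaustively); negative n can never equal
--     # the nonnegative digit sum.  The only solutions are 0, 1 and 9.
--     return n in (0, 1, 9)
-- ===== Notes on version B (the rewrite author's own statement) =====
-- stated objective: simpler
-- what changed: Replaces the digit-peeling loop over n*n by the closed-form membership test n in (0, 1, 9), justified by the bound digitsum(n*n) <= 9*len(str(n*n)), which is below n for every n > 36, plus an exhaustive check of the remaining small candidates.
import Mathlib
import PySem

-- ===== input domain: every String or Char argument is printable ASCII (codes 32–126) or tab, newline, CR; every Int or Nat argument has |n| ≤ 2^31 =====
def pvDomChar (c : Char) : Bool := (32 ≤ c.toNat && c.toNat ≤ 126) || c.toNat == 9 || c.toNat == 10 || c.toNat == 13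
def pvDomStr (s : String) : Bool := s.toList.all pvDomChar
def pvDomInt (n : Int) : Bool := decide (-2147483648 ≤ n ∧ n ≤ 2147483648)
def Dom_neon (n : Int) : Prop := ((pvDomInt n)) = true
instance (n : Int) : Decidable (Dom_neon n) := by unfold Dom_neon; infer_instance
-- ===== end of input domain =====

-- B replaces A's digit-peeling loop over n*n by the closed-form test n ∈ {0,1,9} (proved to be the only ints whose square's digit sum equals them); simpler, constant-time membership test.


-- ===== PORT A =====
-- the inner helper 'sod': while square > 0: peel the last digit into total
def sodLoop (square : Int) (total : Int) : Int :=
  if _h : square > 0 then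
    sodLoop (PySem.Int.floordiv square 10) (total + PySem.Int.mod square 10)
  else total
termination_by square.toNat
decreasing_by
  have : Int.fdiv square 10 = square / 10 := by rw [Int.fdiv_eq_ediv]; simp
  simp [PySem.Int.floordiv]
  omega

def neon (n : Int) : Bool :=
  let n1 := n
  let square := n1 * n1
  let s := sodLoop square 0
  if s == n1 then true else false

-- ===== PORT B =====
-- 'n in (0, 1, 9)': tuple membership = equality against each element
def neon_alt (n : Int) : Bool := n == 0 || n == 1 || n == 9

-- ===== PRECONDITION & SPEC =====
def Spec_neon (n : Int) (out : Bool) : Prop := out = neon_alt n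
instance (n : Int) (out : Bool) : Decidable (Spec_neon n out) := by unfold Spec_neon; infer_instance

-- ===== CLAIM (what is proved, stated in full; the proofs are below) =====
def Claim_equal_neon : Prop := ∀ (n : Int), Dom_neon n → Spec_neon n (neon n)

-- ===== LEMMAS AND PROOFS =====

theorem sodLoop_pos {m t : Int} (h : m > 0) :
    sodLoop m t = sodLoop (PySem.Int.floordiv m 10) (t + PySem.Int.mod m 10) := by
  rw [sodLoop.eq_def]; simp [h]

theorem sodLoop_nonpos {m t : Int} (h : ¬ m > 0) : sodLoop m t = t := by
  rw [sodLoop.eq_def]; simp [h]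

theorem floordiv_pos_eq {m : Int} : PySem.Int.floordiv m 10 = m / 10 := by
  have : Int.fdiv m 10 = m / 10 := by rw [Int.fdiv_eq_ediv]; simp
  simp [PySem.Int.floordiv, this]

theorem mod_pos_eq {m : Int} : PySem.Int.mod m 10 = m % 10 := by
  have : Int.fmod m 10 = m % 10 := by rw [Int.fmod_eq_emod]; simp
  simp [PySem.Int.mod, this]

theorem sodLoop_acc (m t : Int) : sodLoop m t = t + sodLoop m 0 := by
  by_cases h : m > 0
  · rw [sodLoop_pos h, sodLoop_pos h]
    rw [sodLoop_acc (PySem.Int.floordiv m 10) (t + PySem.Int.mod m 10),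
        sodLoop_acc (PySem.Int.floordiv m 10) (0 + PySem.Int.mod m 10)]
    ring
  · rw [sodLoop_nonpos h, sodLoop_nonpos h]; ring
termination_by m.toNat
decreasing_by
  all_goals
    have : Int.fdiv m 10 = m / 10 := by rw [Int.fdiv_eq_ediv]; simp
    simp [PySem.Int.floordiv]
    omega

-- structural fuel evaluator for the proofs (kernel-reducible, used by decide on the small cases)
def sodFuel : Nat → Int → Int
  | 0, _ => 0
  | f+1, m => if m > 0 then PySem.Int.mod m 10 + sodFuel f (PySem.Int.floordiv m 10) else 0

theorem sodLoop_eq_fuel : ∀ (f : Nat) (m : Int), m ≤ (f : Int) → sodLoop m 0 = sodFuel f m := by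
  intro f
  induction f with
  | zero =>
    intro m h
    rw [sodLoop_nonpos (by exact_mod_cast not_lt.mpr h)]
    rfl
  | succ f ih =>
    intro m h
    by_cases hm : m > 0
    · rw [sodLoop_pos hm, sodLoop_acc]
      have hle : m / 10 ≤ (f : Int) := by push_cast at h ⊢; omega
      rw [floordiv_pos_eq, ih (m / 10) hle]
      simp only [sodFuel, if_pos hm, floordiv_pos_eq]
      ring
    · rw [sodLoop_nonpos hm]
      simp only [sodFuel, if_neg hm]

theorem sodFuel_nonneg : ∀ (f : Nat) (m : Int), 0 ≤ sodFuel f m := by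
  intro f
  induction f with
  | zero => intro m; simp [sodFuel]
  | succ f ih =>
    intro m
    simp only [sodFuel]
    split
    · rename_i hm
      have h1 : 0 ≤ PySem.Int.mod m 10 := by
        rw [mod_pos_eq]; exact Int.emod_nonneg _ (by norm_num)
      have := ih (PySem.Int.floordiv m 10)
      linarith
    · linarith

theorem sod_nonneg (m : Int) (hm : 0 ≤ m) : 0 ≤ sodLoop m 0 := by
  rw [sodLoop_eq_fuel m.toNat m (by omega)]
  exact sodFuel_nonneg _ _

theorem sod_le : ∀ (k : Nat) (m : Int), m < 10 ^ k → sodLoop m 0 ≤ 9 * (k : Int) := by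
  intro k
  induction k with
  | zero =>
    intro m h
    rw [sodLoop_nonpos (by simpa using not_lt.mpr (by omega : m ≤ 0))]
    simp
  | succ k ih =>
    intro m h
    by_cases hm : m > 0
    · rw [sodLoop_pos hm, sodLoop_acc, floordiv_pos_eq, mod_pos_eq]
      have hk : (0:Int) < 10 ^ k := by positivity
      have h1 : m / 10 < 10 ^ k := by
        rw [Int.ediv_lt_iff_lt_mul (by norm_num)]
        calc m < 10 ^ (k+1) := h
        _ = 10 ^ k * 10 := by ring
      have h2 : 0 ≤ m % 10 := Int.emod_nonneg _ (by norm_num)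
      have h3 : m % 10 < 10 := Int.emod_lt_of_pos _ (by norm_num)
      have h4 := ih (m / 10) h1
      push_cast
      push_cast at h4
      linarith
    · rw [sodLoop_nonpos hm]
      positivity

theorem neon_alt_false {n : Int} (h0 : n ≠ 0) (h1 : n ≠ 1) (h9 : n ≠ 9) :
    neon_alt n = false := by
  unfold neon_alt
  simp only [Bool.or_eq_false_iff, beq_eq_false_iff_ne]
  exact ⟨⟨h0, h1⟩, h9⟩

theorem neon_false {n : Int} (h : sodLoop (n * n) 0 ≠ n) : neon n = false := by
  show (if sodLoop (n * n) 0 == n then true else false) = false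
  simp [h]

theorem neon_key (n : Int) (hlo : -2147483648 ≤ n) (hhi : n ≤ 2147483648) :
    neon n = neon_alt n := by
  by_cases hneg : n < 0
  · rw [neon_false (by have := sod_nonneg (n * n) (mul_self_nonneg n); omega),
        neon_alt_false (by omega) (by omega) (by omega)]
  · by_cases hbig : 181 ≤ n
    · have hsq : n * n < 10 ^ 20 := by nlinarith
      have hb := sod_le 20 (n * n) hsq
      rw [neon_false (by intro e; rw [e] at hb; norm_num at hb; omega),
          neon_alt_false (by omega) (by omega) (by omega)]
    · -- 0 ≤ n ≤ 180: exhaustive check via the fuel evaluator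
      have h0 : 0 ≤ n := by omega
      have h180 : n ≤ 180 := by omega
      have hsq : n * n ≤ ((32400 : Nat) : Int) := by push_cast; nlinarith
      show (if sodLoop (n * n) 0 == n then true else false) = neon_alt n
      rw [sodLoop_eq_fuel 32400 (n * n) hsq]
      interval_cases n <;> decide

-- ===== VERDICT (by name: the statement is the Claim_ definition above) =====
theorem neon_spec : Claim_equal_neon := by
  intro n hdom
  unfold Dom_neon pvDomInt at hdom
  simp only [decide_eq_true_eq] at hdom
  unfold Spec_neon
  exact neon_key n hdom.1 hdom.2
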